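-- pv_equiv track=rewrite | github.com/jfennell/wordle | letter_boxed.py | _generate_valid_transitions
-- ===== SOURCE A (Python) =====
-- def _generate_valid_transitions(sides):
--     valid_transitions = set()
--
--     for i, side_A in enumerate(sides):
--         for side_B in sides[i+1:]:
--             for c_A in side_A:
--                 for c_B in side_B:
--                     valid_transitions.add(c_A + c_B)
--                     valid_transitions.add(c_B + c_A)
--
--     return valid_transitions
-- ===== SOURCE B (Python) =====
-- def _generate_valid_transitions(sides):
--     out = set()
--     rest = list(sides)
--     while rest:
--         head = rest.pop(0)
--         for side in rest:
--             out.update(t for a in head for b in side for t in (a + b, b + a))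
--     return out
-- ===== Notes on version B (the rewrite author's own statement) =====
-- stated objective: alternative
-- what changed: Replaces A's enumerate-index-and-slice quadruple loop with element-wise set.add by a destructive worklist that pops each side off a copy and bulk-updates the set with a generator of both pair orientations per later side.
import Mathlib
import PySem

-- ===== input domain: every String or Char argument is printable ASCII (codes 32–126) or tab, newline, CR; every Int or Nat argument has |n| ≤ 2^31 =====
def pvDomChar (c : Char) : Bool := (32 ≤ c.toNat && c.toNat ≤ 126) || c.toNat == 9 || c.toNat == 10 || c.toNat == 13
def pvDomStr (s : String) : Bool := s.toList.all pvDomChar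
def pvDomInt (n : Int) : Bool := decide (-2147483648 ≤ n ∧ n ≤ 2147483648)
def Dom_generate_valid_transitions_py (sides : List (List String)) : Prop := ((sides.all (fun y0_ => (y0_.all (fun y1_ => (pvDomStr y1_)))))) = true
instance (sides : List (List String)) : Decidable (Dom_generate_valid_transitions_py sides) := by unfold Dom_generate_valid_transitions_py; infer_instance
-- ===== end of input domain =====

-- B re-implements A as a worklist that pops each side off a copy of the list and bulk-updates the
-- set with each later side's block of pair strings (different decomposition; same cost, no speed claim).

-- ===== PORT A =====
def generate_valid_transitions_py (sides : List (List String)) : List String :=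
  (PySem.List.enumerate sides).foldl
    (fun vt p =>
      (PySem.List.slice sides (some (p.1 + 1)) none).foldl
        (fun vt sideB =>
          p.2.foldl
            (fun vt cA =>
              sideB.foldl
                (fun vt cB => PySem.Set.add (PySem.Set.add vt (cA ++ cB)) (cB ++ cA)) vt)
            vt)
        vt)
    PySem.Set.empty

-- ===== PORT B =====
-- while rest: head = rest.pop(0); for side in rest: out.update(generator of a+b, b+a)
def gvtLoopB : List (List String) → PySem.Set String → PySem.Set String
  | [], out => out
  | head :: rest, out =>
      gvtLoopB rest
        (rest.foldl
          (fun out side =>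
            PySem.Set.update out (head.flatMap (fun a => side.flatMap (fun b => [a ++ b, b ++ a]))))
          out)

def generate_valid_transitions_py_alt (sides : List (List String)) : List String :=
  gvtLoopB sides PySem.Set.empty

-- ===== PRECONDITION & SPEC =====
def Spec_generate_valid_transitions_py (sides : List (List String)) (out : List String) : Prop := out = generate_valid_transitions_py_alt sides
instance (sides : List (List String)) (out : List String) : Decidable (Spec_generate_valid_transitions_py sides out) := by unfold Spec_generate_valid_transitions_py; infer_instance

-- ===== CLAIM (what is proved, stated in full; the proofs are below) =====
def Claim_equal_generate_valid_transitions_py : Prop := ∀ (sides : List (List String)), Dom_generate_valid_transitions_py sides → Spec_generate_valid_transitions_py sides (generate_valid_transitions_py sides)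

-- ===== LEMMAS AND PROOFS =====

-- the sequence of pair strings contributed by one pair of distinct sides, in A's generation order
def pairSeq (h side : List String) : List String :=
  h.flatMap (fun a => side.flatMap (fun b => [a ++ b, b ++ a]))

-- the full generation sequence of A (and of B): for each side, its pairs with every later side
def gvtSeq : List (List String) → List String
  | [] => []
  | h :: t => t.flatMap (pairSeq h) ++ gvtSeq t

theorem foldl_update {α β : Type} [BEq α] (l : List β) (f : β → List α) (s : PySem.Set α) :
    l.foldl (fun s b => PySem.Set.update s (f b)) s = PySem.Set.update s (l.flatMap f) := by
  induction l generalizing s with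
  | nil => simp [PySem.Set.update_nil]
  | cons h t ih => simp [List.foldl_cons, ih, ← PySem.Set.update_append]

theorem inner_pair_fold (vt : List String) (cA : String) (sideB : List String) :
    sideB.foldl (fun vt cB => PySem.Set.add (PySem.Set.add vt (cA ++ cB)) (cB ++ cA)) vt
      = PySem.Set.update vt (sideB.flatMap (fun b => [cA ++ b, b ++ cA])) := by
  induction sideB generalizing vt with
  | nil => simp [PySem.Set.update_nil]
  | cons b bs ih =>
    simp only [List.foldl_cons, List.flatMap_cons, ih, PySem.Set.update_cons,
      List.cons_append, List.nil_append]

theorem side_pair_fold (vt : List String) (sideA sideB : List String) :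
    sideA.foldl
      (fun vt cA =>
        sideB.foldl (fun vt cB => PySem.Set.add (PySem.Set.add vt (cA ++ cB)) (cB ++ cA)) vt) vt
      = PySem.Set.update vt (pairSeq sideA sideB) := by
  simp only [inner_pair_fold]
  exact foldl_update sideA _ vt

theorem A_loop (sides : List (List String)) (t : List (List String)) :
    ∀ (k : Nat) (s : List String), sides.drop k = t →
    (PySem.List.enumerate t (k : Int)).foldl
      (fun vt p =>
        (PySem.List.slice sides (some (p.1 + 1)) none).foldl
          (fun vt sideB =>
            p.2.foldl
              (fun vt cA =>
                sideB.foldl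
                  (fun vt cB => PySem.Set.add (PySem.Set.add vt (cA ++ cB)) (cB ++ cA)) vt)
              vt)
          vt)
      s = PySem.Set.update s (gvtSeq t) := by
  induction t with
  | nil => intro k s _; simp [PySem.List.enumerate, PySem.Set.update_nil, gvtSeq]
  | cons h t' ih =>
    intro k s hdrop
    have hslice : PySem.List.slice sides (some ((k : Int) + 1)) none = t' := by
      have : ((k : Int) + 1) = ((k + 1 : Nat) : Int) := by push_cast; ring
      rw [this, PySem.List.slice_from_natCast]
      rw [← List.tail_drop, hdrop]
      rfl
    have hdrop' : sides.drop (k + 1) = t' := by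
      rw [← List.tail_drop, hdrop]
      rfl
    rw [PySem.List.enumerate_cons, List.foldl_cons]
    have hstep :
        (PySem.List.slice sides (some ((k : Int) + 1)) none).foldl
          (fun vt sideB =>
            h.foldl
              (fun vt cA =>
                sideB.foldl
                  (fun vt cB => PySem.Set.add (PySem.Set.add vt (cA ++ cB)) (cB ++ cA)) vt)
              vt)
          s = PySem.Set.update s (t'.flatMap (pairSeq h)) := by
      rw [hslice]
      simp only [side_pair_fold]
      exact foldl_update t' _ s
    have hcast : ((k : Int) + 1) = ((k + 1 : Nat) : Int) := by push_cast; ring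
    rw [hstep, hcast, ih (k + 1) _ hdrop']
    rw [← PySem.Set.update_append]
    rfl

theorem A_eq (sides : List (List String)) :
    generate_valid_transitions_py sides = PySem.Set.ofList (gvtSeq sides) := by
  unfold generate_valid_transitions_py
  have := A_loop sides sides 0 PySem.Set.empty (by simp)
  simpa [PySem.Set.update_empty] using this

theorem gvtLoopB_eq (t : List (List String)) :
    ∀ (out : PySem.Set String), gvtLoopB t out = PySem.Set.update out (gvtSeq t) := by
  induction t with
  | nil => intro out; simp [gvtLoopB, gvtSeq, PySem.Set.update_nil]
  | cons h rest ih =>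
    intro out
    show gvtLoopB rest
        (rest.foldl
          (fun out side =>
            PySem.Set.update out (h.flatMap (fun a => side.flatMap (fun b => [a ++ b, b ++ a]))))
          out) = _
    rw [foldl_update rest _ out, ih, ← PySem.Set.update_append]
    rfl

theorem B_eq (sides : List (List String)) :
    generate_valid_transitions_py_alt sides = PySem.Set.ofList (gvtSeq sides) := by
  unfold generate_valid_transitions_py_alt
  rw [gvtLoopB_eq, PySem.Set.update_empty]

-- ===== VERDICT (by name: the statement is the Claim_ definition above) =====
theorem generate_valid_transitions_py_spec : Claim_equal_generate_valid_transitions_py := by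
  intro sides _
  show generate_valid_transitions_py sides = generate_valid_transitions_py_alt sides
  rw [A_eq, B_eq]
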